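-- pv_equiv track=rewrite | github.com/Anirudhrn98/Computational_Problem_Solving | lab5/bsearch.py | linearSearchLastMatch
-- ===== SOURCE A (Python) =====
-- def linearSearchLastMatch(startIndex, prefix, wordList):
--     """
--     linear search to find the index of the last word which contains the prefix entered by the user
--
--     :param startIndex: start index of the word from which the prefix starts
--     :param prefix: prefix entered by the user
--     :param wordList: word file containing the words from which to search
--     :return: lastIndex: index of the last word which contains the prefix
--     """
--     lastIndex=-1
--
--     for i in range(startIndex, len(wordList)):
--         if (wordList[i].startswith(prefix)):
--             lastIndex=i
--         else:
--             continue
--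
--     return(lastIndex)
-- ===== SOURCE B (Python) =====
-- def linearSearchLastMatch(startIndex, prefix, wordList):
--     """Backward scan with early exit: walk from the end of the list down to
--     max(startIndex, 0) and return the first matching index found."""
--     lo = max(startIndex, 0)
--     for i in range(len(wordList) - 1, lo - 1, -1):
--         if wordList[i].startswith(prefix):
--             return i
--     return -1
-- ===== Notes on version B (the rewrite author's own statement) =====
-- stated objective: alternative
-- what changed: A scans the whole range forward remembering the last matching index; B scans backward from the end of the list down to max(startIndex,0) and returns at the first match (early exit), so it stops as soon as the answer is found.
import Mathlib
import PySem

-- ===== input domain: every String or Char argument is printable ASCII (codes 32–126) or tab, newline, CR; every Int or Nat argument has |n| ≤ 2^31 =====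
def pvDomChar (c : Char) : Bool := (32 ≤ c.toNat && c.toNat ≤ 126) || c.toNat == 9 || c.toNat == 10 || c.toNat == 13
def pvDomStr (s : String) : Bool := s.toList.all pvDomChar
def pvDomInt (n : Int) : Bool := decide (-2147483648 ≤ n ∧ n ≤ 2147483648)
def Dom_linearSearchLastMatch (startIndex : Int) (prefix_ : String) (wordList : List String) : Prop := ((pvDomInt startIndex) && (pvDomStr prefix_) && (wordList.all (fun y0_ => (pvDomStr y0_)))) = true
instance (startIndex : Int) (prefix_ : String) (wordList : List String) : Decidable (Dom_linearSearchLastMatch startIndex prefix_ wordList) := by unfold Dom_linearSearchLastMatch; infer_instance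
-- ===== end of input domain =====

-- B replaces A's full forward scan (remember-the-last-match) by a backward scan from the
-- end that returns at the first match (early exit); same return value on all of Pre_.

-- ===== PORT A =====
def linearSearchLastMatch (startIndex : Int) (prefix_ : String) (wordList : List String) : Int :=
  (PySem.List.pyRange startIndex (wordList.length : Int) 1).foldl
    (fun lastIndex i =>
      match PySem.List.pyGet? wordList i with
      | some w => if PySem.Str.startswith w prefix_ then i else lastIndex
      | none => lastIndex)   -- Python raises IndexError here; such inputs are outside Pre_
    (-1)

-- ===== PORT B =====
-- countdown loop of Source B: k counts the remaining indices, current index is lo + k - 1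
def lsAltGo (prefix_ : String) (wordList : List String) (lo : Nat) : Nat → Int
  | 0 => -1
  | k+1 =>
    match wordList[lo + k]? with
    | some w =>
        if PySem.Str.startswith w prefix_ then ((lo + k : Nat) : Int)
        else lsAltGo prefix_ wordList lo k
    | none => lsAltGo prefix_ wordList lo k   -- unreachable: lo + k < wordList.length

def linearSearchLastMatch_alt (startIndex : Int) (prefix_ : String) (wordList : List String) : Int :=
  lsAltGo prefix_ wordList (max startIndex 0).toNat
    (wordList.length - (max startIndex 0).toNat)

-- ===== PRECONDITION & SPEC =====
-- Pre_ excludes exactly the inputs where Python A raises IndexError: startIndex < -len(wordList)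
-- (the first loop iteration then evaluates wordList[startIndex] out of range).
def Pre_linearSearchLastMatch (startIndex : Int) (prefix_ : String) (wordList : List String) : Prop :=
  -(wordList.length : Int) ≤ startIndex
instance (startIndex : Int) (prefix_ : String) (wordList : List String) : Decidable (Pre_linearSearchLastMatch startIndex prefix_ wordList) := by unfold Pre_linearSearchLastMatch; infer_instance

def pvWitness_linearSearchLastMatch : Int × String × List String := (0, "a", ["ab", "bc"])

def Spec_linearSearchLastMatch (startIndex : Int) (prefix_ : String) (wordList : List String) (out : Int) : Prop := out = linearSearchLastMatch_alt startIndex prefix_ wordList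
instance (startIndex : Int) (prefix_ : String) (wordList : List String) (out : Int) : Decidable (Spec_linearSearchLastMatch startIndex prefix_ wordList out) := by unfold Spec_linearSearchLastMatch; infer_instance

-- ===== CLAIM (what is proved, stated in full; the proofs are below) =====
def Claim_equal_linearSearchLastMatch : Prop := ∀ (startIndex : Int) (prefix_ : String) (wordList : List String), Dom_linearSearchLastMatch startIndex prefix_ wordList → Pre_linearSearchLastMatch startIndex prefix_ wordList → Spec_linearSearchLastMatch startIndex prefix_ wordList (linearSearchLastMatch startIndex prefix_ wordList)

-- ===== LEMMAS AND PROOFS =====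

-- the match predicate of A, on Int indices (Python-style, through pyGet?)
def pvMatchI (prefix_ : String) (ws : List String) (i : Int) : Bool :=
  match PySem.List.pyGet? ws i with
  | some w => PySem.Str.startswith w prefix_
  | none => false

-- the match predicate of B, on Nat indices
def pvMatchN (prefix_ : String) (ws : List String) (n : Nat) : Bool :=
  match ws[n]? with
  | some w => PySem.Str.startswith w prefix_
  | none => false

theorem pvMatchI_natCast (prefix_ : String) (ws : List String) (n : Nat) :
    pvMatchI prefix_ ws (n : Int) = pvMatchN prefix_ ws n := by
  simp [pvMatchI, pvMatchN]

-- 'remember the last match' fold = last element of the filtered list (or the accumulator)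
theorem foldl_if_last {α : Type} (p : α → Bool) (f : α → Int) (l : List α) (a : Int) :
    l.foldl (fun acc i => if p i then f i else acc) a
      = (((l.filter p).getLast?).map f).getD a := by
  induction l generalizing a with
  | nil => rfl
  | cons x t ih =>
      by_cases h : p x
      · simp only [List.foldl_cons, List.filter_cons, h, if_pos, ih, List.getLast?_cons]
        cases (t.filter p).getLast? <;> simp
      · simp [List.foldl_cons, h, ih]

theorem linearSearchLastMatch_eq_last (startIndex : Int) (prefix_ : String) (ws : List String) :
    linearSearchLastMatch startIndex prefix_ ws
      = ((((PySem.List.pyRange startIndex (ws.length : Int) 1).filter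
            (pvMatchI prefix_ ws)).getLast?).map (fun i => i)).getD (-1) := by
  rw [show linearSearchLastMatch startIndex prefix_ ws
        = (PySem.List.pyRange startIndex (ws.length : Int) 1).foldl
            (fun acc i => if pvMatchI prefix_ ws i then (fun j => j) i else acc) (-1) from ?_,
      foldl_if_last]
  unfold linearSearchLastMatch
  congr 1
  funext acc i
  simp only [pvMatchI]
  cases PySem.List.pyGet? ws i <;> simp

theorem lsAltGo_eq_fold (prefix_ : String) (ws : List String) (lo k : Nat) :
    lsAltGo prefix_ ws lo k
      = (List.range' lo k).foldl
          (fun acc n => if pvMatchN prefix_ ws n then ((n : Nat) : Int) else acc) (-1) := by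
  induction k with
  | zero => rfl
  | succ k ih =>
      rw [List.range'_1_concat, List.foldl_append]
      simp only [List.foldl_cons, List.foldl_nil]
      rw [← ih]
      have hdef : lsAltGo prefix_ ws lo (k+1)
          = match ws[lo + k]? with
            | some w => if PySem.Str.startswith w prefix_ then ((lo + k : Nat) : Int)
                        else lsAltGo prefix_ ws lo k
            | none => lsAltGo prefix_ ws lo k := rfl
      rw [hdef]
      cases h : ws[lo + k]? with
      | none => simp [pvMatchN, h]
      | some w => simp [pvMatchN, h]

theorem lsAltGo_eq_last (prefix_ : String) (ws : List String) (lo k : Nat) :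
    lsAltGo prefix_ ws lo k
      = ((((List.range' lo k).filter (pvMatchN prefix_ ws)).getLast?).map
          (fun n : Nat => (n : Int))).getD (-1) := by
  rw [lsAltGo_eq_fold, foldl_if_last]

-- the filtered Int range over [lo, len) is the cast image of the filtered Nat range
theorem filter_pyRange_cast (prefix_ : String) (ws : List String) (lo : Nat) (hlo : lo ≤ ws.length) :
    (PySem.List.pyRange (lo : Int) (ws.length : Int) 1).filter (pvMatchI prefix_ ws)
      = ((List.range' lo (ws.length - lo)).filter (pvMatchN prefix_ ws)).map (fun n : Nat => (n : Int)) := by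
  have h1 : PySem.List.pyRange (lo : Int) (ws.length : Int) 1
      = (List.range' lo (ws.length - lo)).map (fun n : Nat => (n : Int)) := by
    rw [PySem.List.pyRange_one, List.range'_eq_map_range, List.map_map]
    have : ((ws.length : Int) - (lo : Int)).toNat = ws.length - lo := by omega
    rw [this]
    apply List.map_congr_left
    intro k _
    simp
  rw [h1, List.filter_map]
  congr 1
  apply List.filter_congr
  intro n _
  simp [pvMatchI_natCast]

-- if no index in [0, len) matches, no negative index matches either (wraparound / out of range)
theorem neg_filter_nil (prefix_ : String) (ws : List String)
    (h : (List.range' 0 ws.length).filter (pvMatchN prefix_ ws) = [])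
    (s : Int) :
    (PySem.List.pyRange s 0 1).filter (pvMatchI prefix_ ws) = [] := by
  rw [List.filter_eq_nil_iff]
  intro i hi
  rw [PySem.List.mem_pyRange_one] at hi
  have hneg : i < 0 := hi.2
  by_cases hin : -(ws.length : Int) ≤ i
  · -- in range: wraps to the Nat index ws.length - (-i).toNat, which is in [0, len)
    have hk1 : 0 < (-i).toNat := by omega
    have hk2 : (-i).toNat ≤ ws.length := by omega
    have hieq : i = -(((-i).toNat : Nat) : Int) := by omega
    have hget := PySem.List.pyGet?_neg_natCast ws (-i).toNat hk1 hk2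
    rw [← hieq] at hget
    have hmem : ws.length - (-i).toNat ∈ List.range' 0 ws.length := by
      simp [List.mem_range']
      omega
    have := (List.filter_eq_nil_iff.mp h) _ hmem
    simp only [pvMatchI, hget]
    simpa [pvMatchN] using this
  · -- out of range: pyGet? = none
    have : PySem.List.pyGet? ws i = none := by
      rw [PySem.List.pyGet?_eq_none_iff]
      unfold PySem.Raise.InRange
      omega
    simp [pvMatchI, this]

-- ===== VERDICT (by name: the statement is the Claim_ definition above) =====
theorem linearSearchLastMatch_spec : Claim_equal_linearSearchLastMatch := by
  intro s prefix_ ws _ _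
  unfold Spec_linearSearchLastMatch linearSearchLastMatch_alt
  rw [linearSearchLastMatch_eq_last, lsAltGo_eq_last]
  by_cases hs : 0 ≤ s
  · -- lo = s.toNat, the two ranges coincide
    have hmax : (max s 0).toNat = s.toNat := by omega
    rw [hmax]
    by_cases hle : s.toNat ≤ ws.length
    · have hcast : ((s.toNat : Nat) : Int) = s := by omega
      have hR : PySem.List.pyRange s (ws.length : Int) 1
          = PySem.List.pyRange ((s.toNat : Nat) : Int) (ws.length : Int) 1 := by rw [hcast]
      rw [hR, filter_pyRange_cast prefix_ ws s.toNat hle, List.getLast?_map]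
      cases ((List.range' s.toNat (ws.length - s.toNat)).filter (pvMatchN prefix_ ws)).getLast? <;> simp
    · -- startIndex past the end: both ranges are empty
      have h1 : PySem.List.pyRange s (ws.length : Int) 1 = [] :=
        PySem.List.pyRange_one_eq_nil (by omega)
      have h2 : ws.length - s.toNat = 0 := by omega
      simp [h1, h2]
  · -- negative startIndex: split A's range at 0; the negative part contributes nothing
    have hmax : (max s 0).toNat = 0 := by omega
    rw [hmax, Nat.sub_zero]
    have hsplit : PySem.List.pyRange s (ws.length : Int) 1
        = PySem.List.pyRange s 0 1 ++ PySem.List.pyRange 0 (ws.length : Int) 1 :=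
      PySem.List.pyRange_one_append s 0 (ws.length : Int) (by omega) (by omega)
    have hpos : PySem.List.pyRange ((0 : Nat) : Int) (ws.length : Int) 1
        = PySem.List.pyRange 0 (ws.length : Int) 1 := by norm_num
    have hcast := filter_pyRange_cast prefix_ ws 0 (Nat.zero_le _)
    rw [hpos] at hcast
    rw [hsplit, List.filter_append, hcast]
    by_cases hnil : (List.range' 0 ws.length).filter (pvMatchN prefix_ ws) = []
    · rw [Nat.sub_zero] at hcast ⊢
      rw [hnil, neg_filter_nil prefix_ ws hnil s]
      simp
    · rw [Nat.sub_zero] at hcast ⊢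
      rw [List.getLast?_append_of_ne_nil _ (by simpa using hnil), List.getLast?_map]
      cases ((List.range' 0 ws.length).filter (pvMatchN prefix_ ws)).getLast? <;> simp
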